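-- pv_equiv track=rewrite | github.com/mcoutada/OT303-python | big_data/map_reduce/mrjob_avg_answer_post.py | _combine_dates
-- ===== SOURCE A (Python) =====
-- def _combine_dates(list):
--     """Concatenate creation dates by id.
--
--     Args:
--         list (dict): list with post id and creation dates.
--
--     Returns:
--         dict: dictionary with post id and list of creation dates.
--     """
--     dict = {}
--     for i in list:
--         if i['id'] in dict.keys():
--             dict[i['id']].append(i['creation_date'])
--         else:
--             dict[i['id']] = [i['creation_date']]
--     return dict
-- ===== SOURCE B (Python) =====
-- def _combine_dates(list):
--     keys = dict.fromkeys(i['id'] for i in list)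
--     return {k: [i['creation_date'] for i in list if i['id'] == k] for k in keys}
-- ===== Notes on version B (the rewrite author's own statement) =====
-- stated objective: idiomatic
-- what changed: A builds the dict in one pass with a per-key membership test and in-place append; B first collects the distinct ids in first-occurrence order with dict.fromkeys and then builds the result with a dict comprehension that gathers each id's creation dates by scanning the list per key.
import Mathlib
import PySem

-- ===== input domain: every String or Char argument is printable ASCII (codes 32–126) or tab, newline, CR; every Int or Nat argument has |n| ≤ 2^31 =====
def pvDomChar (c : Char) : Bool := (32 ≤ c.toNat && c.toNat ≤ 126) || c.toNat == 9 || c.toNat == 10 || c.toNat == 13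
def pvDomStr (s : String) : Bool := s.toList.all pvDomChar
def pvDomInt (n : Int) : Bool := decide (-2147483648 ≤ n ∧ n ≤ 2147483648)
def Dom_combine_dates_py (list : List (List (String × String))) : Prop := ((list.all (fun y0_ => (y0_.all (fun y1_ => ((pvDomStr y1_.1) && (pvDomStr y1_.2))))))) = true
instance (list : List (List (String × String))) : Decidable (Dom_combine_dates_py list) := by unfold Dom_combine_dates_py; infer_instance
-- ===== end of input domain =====

-- B replaces A's single hashing pass (membership test + in-place append) by the idiomatic
-- dict.fromkeys dedup of the ids followed by a per-key comprehension; same return value, no speed claim.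

-- ===== PORT A =====
-- A: dict = {}; for i in list: if i['id'] in dict.keys(): dict[i['id']].append(...) else: dict[i['id']] = [...]
-- i['id'] / i['creation_date'] are first-match lookups in the record; a missing key (Python KeyError)
-- is `none` here and excluded by Pre_.
def combine_dates_py (list : List (List (String × String))) : List (String × List String) :=
  (list.foldl (fun (d : PySem.Dict String (List String)) i =>
    match (PySem.Dict.mk i).get? "id" with
    | none => d  -- KeyError: outside Pre_
    | some k =>
      if d.contains k then
        match (PySem.Dict.mk i).get? "creation_date" with
        | none => d  -- KeyError: outside Pre_
        | some c => d.modify k [] (fun v => v ++ [c])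
      else
        match (PySem.Dict.mk i).get? "creation_date" with
        | none => d  -- KeyError: outside Pre_
        | some c => d.insert k [c]) PySem.Dict.empty).items

-- ===== PORT B =====
-- B: keys = dict.fromkeys(i['id'] for i in list);
--    return {k: [i['creation_date'] for i in list if i['id'] == k] for k in keys}
-- dict.fromkeys = PySem.List.dedup; a missing key (Python KeyError) is `none` / skipped, outside Pre_.
def combine_dates_py_alt (list : List (List (String × String))) : List (String × List String) :=
  (PySem.List.dedup (list.filterMap (fun i => (PySem.Dict.mk i).get? "id"))).map
    (fun k => (k, list.filterMap (fun i =>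
      if (PySem.Dict.mk i).get? "id" = some k then (PySem.Dict.mk i).get? "creation_date" else none)))

-- ===== PRECONDITION & SPEC =====
-- Pre_ excludes exactly the records missing an 'id' or 'creation_date' key, on which the Python A
-- raises KeyError (B raises there too).
def Pre_combine_dates_py (list : List (List (String × String))) : Prop :=
  ∀ i ∈ list, (PySem.Dict.mk i).contains "id" = true ∧ (PySem.Dict.mk i).contains "creation_date" = true
instance (list : List (List (String × String))) : Decidable (Pre_combine_dates_py list) := by
  unfold Pre_combine_dates_py; infer_instance

def pvWitness_combine_dates_py : (List (List (String × String))) :=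
  [[("id", "1"), ("creation_date", "2020-01-01")], [("id", "1"), ("creation_date", "2020-01-02")],
   [("id", "2"), ("creation_date", "2020-01-03")]]

def Spec_combine_dates_py (list : List (List (String × String))) (out : List (String × List String)) : Prop := out = combine_dates_py_alt list
instance (list : List (List (String × String))) (out : List (String × List String)) : Decidable (Spec_combine_dates_py list out) := by unfold Spec_combine_dates_py; infer_instance

-- ===== CLAIM (what is proved, stated in full; the proofs are below) =====
def Claim_equal_combine_dates_py : Prop := ∀ (list : List (List (String × String))), Dom_combine_dates_py list → Pre_combine_dates_py list → Spec_combine_dates_py list (combine_dates_py list)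

-- ===== LEMMAS AND PROOFS =====

-- the 'id' value of a record that Pre_ guarantees to exist
def pvKid (i : List (String × String)) : String := ((PySem.Dict.mk i).get? "id").getD ""
def pvKc (i : List (String × String)) : String := ((PySem.Dict.mk i).get? "creation_date").getD ""

lemma pvGet_id (i : List (String × String)) (h : (PySem.Dict.mk i).contains "id" = true) :
    (PySem.Dict.mk i).get? "id" = some (pvKid i) := by
  rw [PySem.Dict.contains_eq_isSome_get?] at h
  cases hg : (PySem.Dict.mk i).get? "id" with
  | none => rw [hg] at h; simp at h
  | some v => simp [pvKid, hg]

lemma pvGet_cd (i : List (String × String)) (h : (PySem.Dict.mk i).contains "creation_date" = true) :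
    (PySem.Dict.mk i).get? "creation_date" = some (pvKc i) := by
  rw [PySem.Dict.contains_eq_isSome_get?] at h
  cases hg : (PySem.Dict.mk i).get? "creation_date" with
  | none => rw [hg] at h; simp at h
  | some v => simp [pvKc, hg]

-- a fresh-key insert of [c] is the same dict as the grouping modify
lemma pvInsert_eq_modify (d : PySem.Dict String (List String)) (k c : String)
    (h : d.contains k = false) : d.insert k [c] = d.modify k [] (fun v => v ++ [c]) := by
  simp [PySem.Dict.insert, PySem.Dict.modify, h, PySem.Dict.getD_of_not_contains d [] h]

-- A's loop is the canonical grouping fold over the (id, creation_date) pairs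
lemma pvA_canon (list : List (List (String × String))) (h : Pre_combine_dates_py list) :
    combine_dates_py list =
      ((list.map (fun i => (pvKid i, pvKc i))).foldl
        (fun d p => d.modify p.1 [] (fun v => v ++ [p.2])) PySem.Dict.empty).items := by
  unfold combine_dates_py
  rw [List.foldl_map]
  congr 1
  apply PySem.List.foldl_congr_mem
  intro d i hi
  obtain ⟨h1, h2⟩ := h i hi
  rw [pvGet_id i h1, pvGet_cd i h2]
  by_cases hc : d.contains (pvKid i)
  · simp [hc]
  · simp only [Bool.not_eq_true] at hc
    simp [hc, pvInsert_eq_modify d (pvKid i) (pvKc i) hc]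

-- B's key list is the ids in first-occurrence order
lemma pvB_keys (list : List (List (String × String))) (h : Pre_combine_dates_py list) :
    list.filterMap (fun i => (PySem.Dict.mk i).get? "id") = list.map pvKid := by
  induction list with
  | nil => rfl
  | cons i rest ih =>
    obtain ⟨h1, _⟩ := h i (List.mem_cons_self)
    rw [List.filterMap_cons, List.map_cons, pvGet_id i h1,
      ih (fun j hj => h j (List.mem_cons_of_mem i hj))]

-- B's per-key comprehension is the filter-then-project of the pairs
lemma pvB_group (list : List (List (String × String))) (h : Pre_combine_dates_py list) (k : String) :
    list.filterMap (fun i =>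
        if (PySem.Dict.mk i).get? "id" = some k then (PySem.Dict.mk i).get? "creation_date" else none)
      = ((list.map (fun i => (pvKid i, pvKc i))).filter (fun p => p.1 == k)).map (fun p => p.2) := by
  induction list with
  | nil => rfl
  | cons i rest ih =>
    obtain ⟨h1, h2⟩ := h i (List.mem_cons_self)
    have ih' := ih (fun j hj => h j (List.mem_cons_of_mem i hj))
    rw [List.filterMap_cons, List.map_cons, List.filter_cons, pvGet_id i h1]
    by_cases hk : pvKid i = k
    · simp [hk, pvGet_cd i h2, ih']
    · simp [hk, ih']

-- ===== VERDICT (by name: the statement is the Claim_ definition above) =====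
theorem combine_dates_py_spec : Claim_equal_combine_dates_py := by
  intro list _ hpre
  show combine_dates_py list = combine_dates_py_alt list
  rw [pvA_canon list hpre]
  rw [PySem.Dict.items_eq_map_keys _
    (PySem.Dict.nodup_keys_foldl_modify_key _ Prod.fst [] _ _ PySem.Dict.nodup_keys_empty) []]
  rw [PySem.Dict.keys_foldl_modify_key]
  unfold combine_dates_py_alt
  rw [pvB_keys list hpre, PySem.List.dedup_eq_ofList, PySem.Set.ofList_eq_foldl]
  have hkeys : PySem.Set.update (PySem.Dict.empty : PySem.Dict String (List String)).keys
      ((list.map (fun i => (pvKid i, pvKc i))).map Prod.fst)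
      = List.foldl PySem.Set.add [] (list.map pvKid) := by
    simp [PySem.Set.update, PySem.Dict.keys_empty, List.map_map]
    rfl
  rw [hkeys]
  apply List.map_congr_left
  intro k _
  rw [PySem.Dict.getD_foldl_modify_append, PySem.Dict.getD_empty, List.nil_append,
    pvB_group list hpre k]
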